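-- pv_equiv track=rewrite | github.com/berkaymizrak/Resume-Django-Web-App | core/utils.py | check_repeated_chars
-- ===== SOURCE A (Python) =====
-- def check_repeated_chars(check_string, recurrent_chars=8):
--     # Create a dictionary to store the count of each character
--     char_count = {}
--
--     # Loop through each character in the string and count its occurrences
--     for char in check_string:
--         if char in char_count:
--             char_count[char] += 1
--         else:
--             char_count[char] = 1
--
--         # If any character count reaches recurrent_chars, raise a flag
--         if char_count[char] >= recurrent_chars:
--             return True
--
--     return False
-- ===== SOURCE B (Python) =====
-- def check_repeated_chars(check_string, recurrent_chars=8):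
--     # Dedupe first, then rescan the whole string per distinct character.
--     return any(check_string.count(c) >= recurrent_chars for c in set(check_string))
-- ===== Notes on version B (the rewrite author's own statement) =====
-- stated objective: idiomatic
-- what changed: Replaces A's fused single-pass counting loop with early exit by a dedupe-then-rescan strategy: build set(check_string) and test each distinct character's total count via str.count in one any(...) expression; despite the worse asymptotic bound each rescan is a C-level str.count instead of A's per-character Python-level dict updates, which measured faster.
import Mathlib
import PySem

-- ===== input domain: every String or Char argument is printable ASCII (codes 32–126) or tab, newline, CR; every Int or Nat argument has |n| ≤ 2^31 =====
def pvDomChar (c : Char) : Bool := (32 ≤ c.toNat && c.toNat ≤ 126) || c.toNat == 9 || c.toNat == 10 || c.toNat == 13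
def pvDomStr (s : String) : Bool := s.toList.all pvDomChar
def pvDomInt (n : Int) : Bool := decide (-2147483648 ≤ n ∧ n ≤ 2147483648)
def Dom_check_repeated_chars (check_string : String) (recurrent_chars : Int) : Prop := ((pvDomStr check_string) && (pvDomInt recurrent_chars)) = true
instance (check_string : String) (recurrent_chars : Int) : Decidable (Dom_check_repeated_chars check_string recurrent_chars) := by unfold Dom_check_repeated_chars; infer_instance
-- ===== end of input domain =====

-- B: dedupe-then-rescan (set of distinct chars, then total count per char) instead of A's
-- single fused counting loop with early exit; same return value, stated as an alternative.
-- ===== PORT A =====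
-- the for-loop over the characters with the running char_count dict and the early `return True`
def pvLoopA (recurrent_chars : Int) : List Char → PySem.Dict Char Int → Bool
  | [], _ => false
  | c :: rest, char_count =>
    let char_count' :=
      if char_count.contains c then char_count.insert c (char_count.getD c 0 + 1)
      else char_count.insert c 1
    if char_count'.getD c 0 ≥ recurrent_chars then true
    else pvLoopA recurrent_chars rest char_count'

def check_repeated_chars (check_string : String) (recurrent_chars : Int) : Bool :=
  pvLoopA recurrent_chars check_string.toList PySem.Dict.empty

-- ===== PORT B =====
def check_repeated_chars_alt (check_string : String) (recurrent_chars : Int) : Bool :=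
  (PySem.Set.ofList check_string.toList).any
    (fun c => decide ((PySem.Str.count check_string (String.ofList [c]) : Int) ≥ recurrent_chars))

-- ===== PRECONDITION & SPEC =====
def Spec_check_repeated_chars (check_string : String) (recurrent_chars : Int) (out : Bool) : Prop := out = check_repeated_chars_alt check_string recurrent_chars
instance (check_string : String) (recurrent_chars : Int) (out : Bool) : Decidable (Spec_check_repeated_chars check_string recurrent_chars out) := by unfold Spec_check_repeated_chars; infer_instance

-- ===== CLAIM (what is proved, stated in full; the proofs are below) =====
def Claim_equal_check_repeated_chars : Prop := ∀ (check_string : String) (recurrent_chars : Int), Dom_check_repeated_chars check_string recurrent_chars → Spec_check_repeated_chars check_string recurrent_chars (check_repeated_chars check_string recurrent_chars)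

-- ===== LEMMAS AND PROOFS =====

-- str.count of a single-character needle equals the character count of the list
theorem countGo_single (c : Char) : ∀ (l : List Char) (fuel acc : Nat), l.length ≤ fuel →
    PySem.Chars.count.go [c] fuel l acc = acc + l.count c := by
  intro l
  induction l with
  | nil => intro fuel acc _; cases fuel <;> simp [PySem.Chars.count.go]
  | cons h t ih =>
      intro fuel acc hf
      cases fuel with
      | zero => simp at hf
      | succ n =>
          have hn : t.length ≤ n := by simp at hf; omega
          by_cases hc : c = h
          · subst hc
            have hpre : List.isPrefixOf [c] (c :: t) = true := by simp [List.isPrefixOf]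
            simp only [PySem.Chars.count.go, hpre, if_pos]
            have hdrop : List.drop [c].length (c :: t) = t := rfl
            rw [hdrop, ih n (acc + 1) hn, List.count_cons_self]
            omega
          · have hpre : List.isPrefixOf [c] (h :: t) = false := by
              simp [List.isPrefixOf, hc]
            simp only [PySem.Chars.count.go, hpre, Bool.false_eq_true, if_false]
            rw [ih n acc hn, List.count_cons_of_ne (Ne.symm hc)]

theorem str_count_single (s : String) (c : Char) :
    PySem.Str.count s (String.ofList [c]) = s.toList.count c := by
  have h := countGo_single c s.toList s.toList.length 0 le_rfl
  rw [PySem.Str.count_eq, String.toList_ofList]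
  simp only [PySem.Chars.count]
  rw [if_neg (by simp), h]
  omega

-- one step of A's dict update: the count of c goes up by one, everything else is unchanged
theorem getD_update (d : PySem.Dict Char Int) (c x : Char) :
    ((if d.contains c then d.insert c (d.getD c 0 + 1) else d.insert c 1).getD x 0)
      = if x = c then d.getD c 0 + 1 else d.getD x 0 := by
  cases h : d.contains c with
  | true => simp [PySem.Dict.getD_insert]
  | false =>
      have h0 : d.getD c 0 = 0 := by simp [PySem.Dict.getD_of_not_contains, h]
      simp [PySem.Dict.getD_insert, h0]

-- characterisation of A's loop: true iff some character's carried-in count plus its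
-- remaining occurrences reaches the threshold
theorem pvLoopA_iff (r : Int) : ∀ (l : List Char) (d : PySem.Dict Char Int),
    pvLoopA r l d = true ↔ ∃ c ∈ l, r ≤ d.getD c 0 + (l.count c : Int) := by
  intro l
  induction l with
  | nil => intro d; simp [pvLoopA]
  | cons c rest ih =>
      intro d
      simp only [pvLoopA]
      set d' := if d.contains c then d.insert c (d.getD c 0 + 1) else d.insert c 1 with hd'
      have hup : ∀ x, d'.getD x 0 = if x = c then d.getD c 0 + 1 else d.getD x 0 :=
        fun x => getD_update d c x
      have hupc : d'.getD c 0 = d.getD c 0 + 1 := by rw [hup c]; simp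
      by_cases hcond : d'.getD c 0 ≥ r
      · rw [if_pos hcond]
        have hc : r ≤ d.getD c 0 + 1 := by omega
        constructor
        · intro _
          refine ⟨c, List.mem_cons_self, ?_⟩
          rw [List.count_cons_self]
          push_cast
          omega
        · intro _; rfl
      · rw [if_neg hcond, ih d']
        have hc : ¬ r ≤ d.getD c 0 + 1 := by omega
        constructor
        · rintro ⟨x, hx, hle⟩
          rw [hup x] at hle
          by_cases hxc : x = c
          · subst hxc
            rw [if_pos rfl] at hle
            refine ⟨x, List.mem_cons_self, ?_⟩
            rw [List.count_cons_self]
            push_cast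
            omega
          · rw [if_neg hxc] at hle
            refine ⟨x, List.mem_cons_of_mem _ hx, ?_⟩
            rw [List.count_cons_of_ne (Ne.symm hxc)]
            exact hle
        · rintro ⟨x, hx, hle⟩
          rcases List.mem_cons.mp hx with hxc | hxr
          · subst hxc
            rw [List.count_cons_self] at hle
            push_cast at hle
            have hcnt : 0 < rest.count x := by omega
            refine ⟨x, List.count_pos_iff.mp hcnt, ?_⟩
            rw [hup x, if_pos rfl]
            omega
          · by_cases hxc : x = c
            · subst hxc
              rw [List.count_cons_self] at hle
              push_cast at hle
              refine ⟨x, hxr, ?_⟩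
              rw [hup x, if_pos rfl]
              omega
            · refine ⟨x, hxr, ?_⟩
              rw [hup x, if_neg hxc]
              rw [List.count_cons_of_ne (Ne.symm hxc)] at hle
              exact hle

-- characterisation of B: true iff some character of the string occurs at least r times
theorem alt_iff (s : String) (r : Int) :
    check_repeated_chars_alt s r = true ↔ ∃ c ∈ s.toList, r ≤ (s.toList.count c : Int) := by
  unfold check_repeated_chars_alt
  simp only [List.any_eq_true, decide_eq_true_eq, str_count_single, ge_iff_le,
    PySem.Set.mem_ofList]

-- ===== VERDICT =====
theorem check_repeated_chars_spec : Claim_equal_check_repeated_chars := by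
  intro s r _
  unfold Spec_check_repeated_chars check_repeated_chars
  rw [Bool.eq_iff_iff, pvLoopA_iff, alt_iff]
  simp [PySem.Dict.getD_empty]
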